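-- pv_equiv track=rewrite | github.com/RustamHabibovv/hostinger-horizons-project | backend/app/services/agent/executor.py | _import_exists
-- ===== SOURCE A (Python) =====
-- def _import_exists(resolved_path: str, all_files: set[str]) -> bool:
--     """Check if an import resolves to an existing file."""
--     # Check exact match first
--     if resolved_path in all_files:
--         return True
--
--     # Try common extensions
--     extensions = [".js", ".jsx", ".ts", ".tsx", ".json", "/index.js", "/index.jsx", "/index.ts", "/index.tsx"]
--
--     for ext in extensions:
--         if (resolved_path + ext) in all_files:
--             return True
--         # Also check normalized paths (e.g., src\\file.js vs src/file.js)
--         normalized = resolved_path.replace("\\", "/") + ext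
--         if any(f.replace("\\", "/") == normalized for f in all_files):
--             return True
--
--     return False
-- ===== SOURCE B (Python) =====
-- def _import_exists(resolved_path: str, all_files: set[str]) -> bool:
--     """Check if an import resolves to an existing file."""
--     extensions = [".js", ".jsx", ".ts", ".tsx", ".json", "/index.js", "/index.jsx", "/index.ts", "/index.tsx"]
--     raw_targets = {resolved_path, *(resolved_path + ext for ext in extensions)}
--     norm = resolved_path.replace("\\", "/")
--     norm_targets = {norm + ext for ext in extensions}
--     for f in all_files:
--         if f in raw_targets or f.replace("\\", "/") in norm_targets:
--             return True
--     return False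
-- ===== Notes on version B (the rewrite author's own statement) =====
-- stated objective: faster
-- what changed: B precomputes the (at most 19) match targets as two hash sets (raw targets including the bare path, normalized targets per extension) and makes one pass over the files, instead of A's per-extension membership tests plus a fresh scan of all files for each of the 9 extensions.
import Mathlib
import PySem

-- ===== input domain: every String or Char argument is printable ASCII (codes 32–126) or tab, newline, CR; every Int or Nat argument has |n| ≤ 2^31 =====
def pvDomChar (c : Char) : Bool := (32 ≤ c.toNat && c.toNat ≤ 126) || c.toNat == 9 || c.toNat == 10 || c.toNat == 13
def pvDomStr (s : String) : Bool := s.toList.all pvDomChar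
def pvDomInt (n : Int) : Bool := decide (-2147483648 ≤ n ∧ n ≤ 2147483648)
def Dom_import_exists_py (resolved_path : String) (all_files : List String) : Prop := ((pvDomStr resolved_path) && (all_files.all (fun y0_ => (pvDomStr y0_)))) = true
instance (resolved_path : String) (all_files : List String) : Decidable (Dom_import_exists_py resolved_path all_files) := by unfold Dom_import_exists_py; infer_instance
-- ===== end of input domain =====

-- B builds the (≤ 19) match targets once and makes a single pass over the files,
-- replacing A's nine repeated scans of the file set (objective: alternative/faster single pass).

-- the extension list both Pythons spell out
def pvExts : List String :=
  [".js", ".jsx", ".ts", ".tsx", ".json", "/index.js", "/index.jsx", "/index.ts", "/index.tsx"]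

-- ===== PORT A =====
def import_exists_py (resolved_path : String) (all_files : List String) : Bool :=
  if all_files.contains resolved_path then true
  else
    -- for ext in extensions: two early-return checks, else False after the loop
    pvExts.any (fun ext =>
      all_files.contains (resolved_path ++ ext) ||
      all_files.any (fun f =>
        PySem.Str.replace f "\\" "/" == PySem.Str.replace resolved_path "\\" "/" ++ ext))

-- ===== PORT B =====
def import_exists_py_alt (resolved_path : String) (all_files : List String) : Bool :=
  let rawTargets := PySem.Set.ofList (resolved_path :: pvExts.map (fun ext => resolved_path ++ ext))
  let norm := PySem.Str.replace resolved_path "\\" "/"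
  let normTargets := PySem.Set.ofList (pvExts.map (fun ext => norm ++ ext))
  all_files.any (fun f =>
    PySem.Set.contains rawTargets f ||
    PySem.Set.contains normTargets (PySem.Str.replace f "\\" "/"))

-- ===== PRECONDITION & SPEC =====
def Spec_import_exists_py (resolved_path : String) (all_files : List String) (out : Bool) : Prop := out = import_exists_py_alt resolved_path all_files
instance (resolved_path : String) (all_files : List String) (out : Bool) : Decidable (Spec_import_exists_py resolved_path all_files out) := by unfold Spec_import_exists_py; infer_instance

-- ===== CLAIM (what is proved, stated in full; the proofs are below) =====
def Claim_equal_import_exists_py : Prop := ∀ (resolved_path : String) (all_files : List String), Dom_import_exists_py resolved_path all_files → Spec_import_exists_py resolved_path all_files (import_exists_py resolved_path all_files)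

-- ===== LEMMAS AND PROOFS =====

theorem import_exists_eq (resolved_path : String) (all_files : List String) :
    import_exists_py resolved_path all_files = import_exists_py_alt resolved_path all_files := by
  unfold import_exists_py import_exists_py_alt
  split_ifs with hm
  · symm
    simp only [List.any_eq_true, PySem.Set.contains_iff, PySem.Set.mem_ofList,
      List.mem_cons, Bool.or_eq_true]
    exact ⟨resolved_path, List.contains_iff_mem.mp hm, Or.inl (Or.inl rfl)⟩
  · rw [Bool.eq_iff_iff]
    simp only [List.any_eq_true, List.contains_iff_mem, PySem.Set.contains_iff,
      PySem.Set.mem_ofList, List.mem_cons, List.mem_map, beq_iff_eq, Bool.or_eq_true]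
    constructor
    · rintro ⟨ext, hext, hraw | ⟨f, hf, hnorm⟩⟩
      · exact ⟨resolved_path ++ ext, hraw, Or.inl (Or.inr ⟨ext, hext, rfl⟩)⟩
      · exact ⟨f, hf, Or.inr ⟨ext, hext, hnorm.symm⟩⟩
    · rintro ⟨f, hf, (rfl | ⟨ext, hext, rfl⟩) | ⟨ext, hext, hnorm⟩⟩
      · exact absurd (List.contains_iff_mem.mpr hf) hm
      · exact ⟨ext, hext, Or.inl hf⟩
      · exact ⟨ext, hext, Or.inr ⟨f, hf, hnorm.symm⟩⟩

-- ===== VERDICT (by name: the statement is the Claim_ definition above) =====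
theorem import_exists_py_spec : Claim_equal_import_exists_py := by
  intro rp files _
  exact import_exists_eq rp files
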